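-- pv_equiv track=rewrite | github.com/emKat-tecbot/Administrador-para-estudiantes- | organizador de horario/codigo-horario.py | reporte_carga
-- ===== SOURCE A (Python) =====
-- DIAS = ["Lunes", "Martes", "Miércoles", "Jueves", "Viernes"]
--
-- LIBRE = "LIBRE"
--
-- DESCANSO = "DESCANSO"
--
-- def contar_clases_en_dia(fila: list[str]) -> int:
--     return sum(1 for c in fila if c not in (LIBRE, DESCANSO) and not str(c).startswith("TAREA:"))
--
-- def contar_tareas_en_dia(fila: list[str]) -> int:
--     return sum(1 for c in fila if isinstance(c, str) and c.startswith("TAREA:"))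
--
-- def reporte_carga(matriz: list[list[str]]) -> dict:
--     resumen = {}
--     for d_idx, dia in enumerate(DIAS):
--         fila = matriz[d_idx]
--         clases = contar_clases_en_dia(fila)
--         tareas = contar_tareas_en_dia(fila)
--         libres = sum(1 for c in fila if c == LIBRE)
--         resumen[dia] = {"clases": clases, "tareas": tareas, "libres": libres}
--     return resumen
-- ===== SOURCE B (Python) =====
-- DIAS = ["Lunes", "Martes", "Miércoles", "Jueves", "Viernes"]
--
-- LIBRE = "LIBRE"
--
-- DESCANSO = "DESCANSO"
--
-- def _conteos_fila(fila):
--     clases = tareas = libres = 0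
--     for c in fila:
--         if c == LIBRE:
--             libres += 1
--         elif str(c).startswith("TAREA:"):
--             tareas += 1
--         elif c == DESCANSO:
--             pass
--         else:
--             clases += 1
--     return clases, tareas, libres
--
-- def reporte_carga(matriz: list[list[str]]) -> dict:
--     resumen = {}
--     for d_idx, dia in enumerate(DIAS):
--         clases, tareas, libres = _conteos_fila(matriz[d_idx])
--         resumen[dia] = {"clases": clases, "tareas": tareas, "libres": libres}
--     return resumen
-- ===== Notes on version B (the rewrite author's own statement) =====
-- stated objective: simpler
-- what changed: B replaces A's three independent scans of each day's row (two helper comprehensions plus an inline sum) with a single pass over the row maintaining three counters (clases, tareas, libres) in one if/elif chain.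
import Mathlib
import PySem

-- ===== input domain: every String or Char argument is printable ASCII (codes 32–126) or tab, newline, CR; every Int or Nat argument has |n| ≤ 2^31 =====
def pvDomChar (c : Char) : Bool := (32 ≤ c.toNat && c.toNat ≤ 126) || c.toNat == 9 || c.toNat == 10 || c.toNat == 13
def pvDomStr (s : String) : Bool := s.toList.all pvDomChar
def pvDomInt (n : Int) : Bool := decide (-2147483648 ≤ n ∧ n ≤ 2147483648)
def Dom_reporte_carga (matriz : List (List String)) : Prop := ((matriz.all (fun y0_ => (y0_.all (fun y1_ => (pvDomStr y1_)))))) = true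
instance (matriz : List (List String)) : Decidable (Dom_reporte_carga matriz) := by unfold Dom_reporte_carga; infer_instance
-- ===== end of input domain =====

-- B replaces A's three scans per row by a single three-counter pass (objective: simpler).

-- ===== PORT A =====
def pvDIAS : List String := ["Lunes", "Martes", "Miércoles", "Jueves", "Viernes"]

def contar_clases_en_dia (fila : List String) : Int :=
  ((fila.filter (fun c => !(c == "LIBRE" || c == "DESCANSO") && !(PySem.Str.startswith c "TAREA:"))).length : Int)

def contar_tareas_en_dia (fila : List String) : Int :=
  ((fila.filter (fun c => PySem.Str.startswith c "TAREA:")).length : Int)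

def reporte_carga (matriz : List (List String)) : List (String × List (String × Int)) :=
  (PySem.List.enumerate pvDIAS).foldl
    (fun resumen p =>
      let fila := PySem.List.pyGetD matriz p.1 []
      let clases := contar_clases_en_dia fila
      let tareas := contar_tareas_en_dia fila
      let libres := ((fila.filter (fun c => c == "LIBRE")).length : Int)
      -- dict insertion: DIAS keys are distinct and fresh, so each resumen[dia]=… appends
      resumen ++ [(p.2, [("clases", clases), ("tareas", tareas), ("libres", libres)])])
    []

-- ===== PORT B =====
def pvStep (acc : Int × Int × Int) (c : String) : Int × Int × Int :=
  if c == "LIBRE" then (acc.1, acc.2.1, acc.2.2 + 1)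
  else if PySem.Str.startswith c "TAREA:" then (acc.1, acc.2.1 + 1, acc.2.2)
  else if c == "DESCANSO" then acc
  else (acc.1 + 1, acc.2.1, acc.2.2)

def conteos_fila (fila : List String) : Int × Int × Int :=
  fila.foldl pvStep (0, 0, 0)

def reporte_carga_alt (matriz : List (List String)) : List (String × List (String × Int)) :=
  (PySem.List.enumerate pvDIAS).foldl
    (fun resumen p =>
      let t := conteos_fila (PySem.List.pyGetD matriz p.1 [])
      resumen ++ [(p.2, [("clases", t.1), ("tareas", t.2.1), ("libres", t.2.2)])])
    []

-- ===== PRECONDITION & SPEC =====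
-- Pre_: A indexes matriz[0..4]; with fewer than 5 rows Python raises IndexError.
def Pre_reporte_carga (matriz : List (List String)) : Prop := 5 ≤ matriz.length
instance (matriz : List (List String)) : Decidable (Pre_reporte_carga matriz) := by unfold Pre_reporte_carga; infer_instance

def pvWitness_reporte_carga : List (List String) :=
  [["LIBRE", "Mat", "TAREA: x"], ["DESCANSO"], [], [], ["LIBRE", "LIBRE"]]

def Spec_reporte_carga (matriz : List (List String)) (out : List (String × List (String × Int))) : Prop := out = reporte_carga_alt matriz
instance (matriz : List (List String)) (out : List (String × List (String × Int))) : Decidable (Spec_reporte_carga matriz out) := by unfold Spec_reporte_carga; infer_instance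

-- ===== CLAIM (what is proved, stated in full; the proofs are below) =====
def Claim_equal_reporte_carga : Prop := ∀ (matriz : List (List String)), Dom_reporte_carga matriz → Pre_reporte_carga matriz → Spec_reporte_carga matriz (reporte_carga matriz)

-- ===== LEMMAS AND PROOFS =====

-- single-pass counters = the three filter counts
theorem conteos_fila_go (fila : List String) (a b c : Int) :
    fila.foldl pvStep (a, b, c) =
    (a + contar_clases_en_dia fila, b + contar_tareas_en_dia fila,
     c + ((fila.filter (fun x => x == "LIBRE")).length : Int)) := by
  have hL : PySem.Chars.startswith ['L', 'I', 'B', 'R', 'E']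
      ['T', 'A', 'R', 'E', 'A', ':'] = false := by decide
  have hD : PySem.Chars.startswith ['D', 'E', 'S', 'C', 'A', 'N', 'S', 'O']
      ['T', 'A', 'R', 'E', 'A', ':'] = false := by decide
  have ht : "TAREA:".toList = ['T', 'A', 'R', 'E', 'A', ':'] := by decide
  induction fila generalizing a b c with
  | nil => simp [contar_clases_en_dia, contar_tareas_en_dia]
  | cons x xs ih =>
    rw [List.foldl_cons]
    by_cases h1x : x = "LIBRE"
    · subst h1x
      rw [show pvStep (a, b, c) "LIBRE" = (a, b, c + 1) from rfl, ih]
      simp only [contar_clases_en_dia, contar_tareas_en_dia, List.filter_cons]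
      simp [hL]
      omega
    · have b1 : (x == "LIBRE") = false := by simp [h1x]
      by_cases h2x : PySem.Str.startswith x "TAREA:" = true
      · have b2 : PySem.Chars.startswith x.toList ['T', 'A', 'R', 'E', 'A', ':'] = true := by
          rw [← ht]; simpa using h2x
        rw [show pvStep (a, b, c) x = (a, b + 1, c) from by
          simp [pvStep, b1, b2, ht], ih]
        simp only [contar_clases_en_dia, contar_tareas_en_dia, List.filter_cons]
        simp [b1, b2]
        omega
      · have b2 : PySem.Chars.startswith x.toList ['T', 'A', 'R', 'E', 'A', ':'] = false := by
          rw [← ht]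
          have := Bool.not_eq_true _ |>.mp h2x
          simpa using this
        by_cases h3x : x = "DESCANSO"
        · subst h3x
          rw [show pvStep (a, b, c) "DESCANSO" = (a, b, c) from by
            simp [pvStep, b1]; simpa [ht] using b2, ih]
          simp only [contar_clases_en_dia, contar_tareas_en_dia, List.filter_cons]
          simp [b1, hD]
        · have b3 : (x == "DESCANSO") = false := by simp [h3x]
          rw [show pvStep (a, b, c) x = (a + 1, b, c) from by
            simp [pvStep, b1, b3]; simpa [ht] using b2, ih]
          simp only [contar_clases_en_dia, contar_tareas_en_dia, List.filter_cons]
          simp [b1, b2, b3]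
          omega

theorem conteos_fila_eq (fila : List String) :
    conteos_fila fila =
      (contar_clases_en_dia fila, contar_tareas_en_dia fila,
       ((fila.filter (fun x => x == "LIBRE")).length : Int)) := by
  unfold conteos_fila
  rw [conteos_fila_go fila 0 0 0]
  simp

-- ===== VERDICT (by name: the statement is the Claim_ definition above) =====
theorem reporte_carga_spec : Claim_equal_reporte_carga := by
  intro matriz _ _
  unfold Spec_reporte_carga reporte_carga reporte_carga_alt
  congr 1
  funext resumen p
  simp [conteos_fila_eq]
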